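-- pv_equiv track=rewrite | github.com/xjtatnku/halludomainbenchandsafeguard | ai_HalluDomainBench-main/halludomainbench/extractors.py | _truncate_to_url_chars
-- ===== SOURCE A (Python) =====
-- URL_SAFE_CHARS = frozenset("ABCDEFGHIJKLMNOPQRSTUVWXYZabcdefghijklmnopqrstuvwxyz0123456789-._~:/?#[]@!$&'()+,;=%")
--
-- def _truncate_to_url_chars(raw: str) -> str:
--     buffer: list[str] = []
--     for char in raw:
--         if char in URL_SAFE_CHARS:
--             buffer.append(char)
--             continue
--         break
--     return "".join(buffer)
-- ===== SOURCE B (Python) =====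
-- URL_SAFE_CHARS = frozenset("ABCDEFGHIJKLMNOPQRSTUVWXYZabcdefghijklmnopqrstuvwxyz0123456789-._~:/?#[]@!$&'()+,;=%")
--
-- def _truncate_to_url_chars(raw: str) -> str:
--     # Stage 1: find the index of the first invalid character (defaults to len(raw));
--     # Stage 2: slice the string up to that index. No buffer is built.
--     cut = next((i for i, ch in enumerate(raw) if ch not in URL_SAFE_CHARS), len(raw))
--     return raw[:cut]
-- ===== Notes on version B (the rewrite author's own statement) =====
-- stated objective: alternative
-- what changed: Instead of A's one-pass loop that appends characters into a buffer and breaks at the first invalid one, B runs two stages: it first locates the index of the first non-URL-safe character via enumerate (defaulting to len(raw)), then returns the slice raw[:cut]; no buffer is maintained.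
import Mathlib
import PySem

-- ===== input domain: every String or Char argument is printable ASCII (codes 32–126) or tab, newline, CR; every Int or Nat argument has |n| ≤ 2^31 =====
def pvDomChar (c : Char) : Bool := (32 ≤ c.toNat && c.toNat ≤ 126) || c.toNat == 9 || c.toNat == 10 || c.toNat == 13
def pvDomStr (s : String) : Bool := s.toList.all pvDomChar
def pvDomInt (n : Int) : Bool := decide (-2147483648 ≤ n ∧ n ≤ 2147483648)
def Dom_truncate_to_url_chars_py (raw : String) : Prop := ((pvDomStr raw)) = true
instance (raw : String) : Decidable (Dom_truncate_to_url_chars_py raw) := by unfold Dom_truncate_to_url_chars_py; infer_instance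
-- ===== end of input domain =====

-- ===== PORT A =====
-- B finds the index of the first non-URL-safe character, then slices; A appends into a buffer and breaks.
def urlSafeChars : List Char :=
  "ABCDEFGHIJKLMNOPQRSTUVWXYZabcdefghijklmnopqrstuvwxyz0123456789-._~:/?#[]@!$&'()+,;=%".toList

-- A's for-loop: append while the char is URL-safe, break at the first that is not
def truncAux (chars : List Char) (buffer : List Char) : List Char :=
  match chars with
  | [] => buffer
  | c :: rest => if urlSafeChars.contains c then truncAux rest (buffer ++ [c]) else buffer

def truncate_to_url_chars_py (raw : String) : String :=
  String.ofList (truncAux raw.toList [])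

-- ===== PORT B =====
-- stage 1 of Source B: first index i with raw[i] not URL-safe, default len(raw)
def firstInvalidIdx (chars : List Char) : Nat :=
  chars.findIdx (fun c => !(urlSafeChars.contains c))

-- stage 2: the slice raw[:cut]
def truncate_to_url_chars_py_alt (raw : String) : String :=
  String.ofList (PySem.List.slice raw.toList none (some ((firstInvalidIdx raw.toList : Nat) : Int)))

-- ===== PRECONDITION & SPEC =====
def Spec_truncate_to_url_chars_py (raw : String) (out : String) : Prop := out = truncate_to_url_chars_py_alt raw
instance (raw : String) (out : String) : Decidable (Spec_truncate_to_url_chars_py raw out) := by unfold Spec_truncate_to_url_chars_py; infer_instance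

-- ===== CLAIM (what is proved, stated in full; the proofs are below) =====
def Claim_equal_truncate_to_url_chars_py : Prop := ∀ (raw : String), Dom_truncate_to_url_chars_py raw → Spec_truncate_to_url_chars_py raw (truncate_to_url_chars_py raw)

-- ===== LEMMAS AND PROOFS =====
theorem truncAux_eq_take_findIdx (l buf : List Char) :
    truncAux l buf = buf ++ l.take (l.findIdx (fun c => !(urlSafeChars.contains c))) := by
  induction l generalizing buf with
  | nil => simp [truncAux]
  | cons c rest ih =>
    simp only [truncAux, List.findIdx_cons]
    by_cases h : c ∈ urlSafeChars <;> simp [h, ih]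

-- ===== VERDICT (by name: the statement is the Claim_ definition above) =====
theorem truncate_to_url_chars_py_spec : Claim_equal_truncate_to_url_chars_py := by
  intro raw _
  unfold Spec_truncate_to_url_chars_py truncate_to_url_chars_py truncate_to_url_chars_py_alt firstInvalidIdx
  rw [PySem.List.slice_to_natCast, truncAux_eq_take_findIdx]
  simp
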